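-- pv_equiv track=rewrite | github.com/XxxGHOSTX/MNN | mnn/solver/smt_solver.py | _check_brace_balance
-- ===== SOURCE A (Python) =====
-- def _check_brace_balance(content: str) -> bool:
--     """
--     Check if braces are balanced.
--
--     Args:
--         content: Content to check
--
--     Returns:
--         True if balanced, False otherwise
--     """
--     stack = []
--     pairs = {'(': ')', '[': ']', '{': '}'}
--
--     for char in content:
--         if char in pairs:
--             stack.append(char)
--         elif char in pairs.values():
--             if not stack:
--                 return False
--             if pairs[stack[-1]] != char:
--                 return False
--             stack.pop()
--
--     return len(stack) == 0
-- ===== SOURCE B (Python) =====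
-- def _check_brace_balance(content: str) -> bool:
--     """Keep only bracket characters, then cancel adjacent matched pairs to a fixpoint."""
--     s = ''.join(ch for ch in content if ch in '()[]{}')
--     while True:
--         t = s.replace('()', '').replace('[]', '').replace('{}', '')
--         if t == s:
--             return s == ''
--         s = t
-- ===== Notes on version B (the rewrite author's own statement) =====
-- stated objective: alternative
-- what changed: Replaces A's explicit stack scan by a filter-then-cancel fixpoint: keep only bracket characters, then repeatedly delete every adjacent matched open-close pair via str.replace until the string stops changing; the input is balanced iff the residue is empty.
import Mathlib
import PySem

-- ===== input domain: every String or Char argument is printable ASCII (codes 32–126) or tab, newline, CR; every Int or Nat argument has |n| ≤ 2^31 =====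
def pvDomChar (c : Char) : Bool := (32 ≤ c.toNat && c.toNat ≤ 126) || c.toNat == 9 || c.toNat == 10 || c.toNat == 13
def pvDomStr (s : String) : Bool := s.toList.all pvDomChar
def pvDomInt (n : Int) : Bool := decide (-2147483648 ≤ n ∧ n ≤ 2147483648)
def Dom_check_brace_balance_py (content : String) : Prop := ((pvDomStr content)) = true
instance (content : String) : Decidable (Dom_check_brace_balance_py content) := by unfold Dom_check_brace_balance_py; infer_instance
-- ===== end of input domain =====

-- B replaces A's explicit bracket stack by a filter-then-cancel fixpoint: keep only the bracket
-- characters, then repeatedly delete every adjacent matched open-close pair until nothing changes;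
-- the input is balanced iff the residue is empty (objective: alternative decomposition).

-- ===== PORT A =====
def pvPairsA : PySem.Dict Char Char := PySem.Dict.ofList [('(', ')'), ('[', ']'), ('{', '}')]

-- A's loop with early returns; the stack is kept head-as-top (Python appends/pops at the
-- tail and reads stack[-1]); the final [] case is Python's 'return len(stack) == 0'.
def goBalance (stack : List Char) : List Char → Bool
  | [] => stack.length == 0
  | ch :: rest =>
    if pvPairsA.contains ch then goBalance (ch :: stack) rest
    else if ch ∈ pvPairsA.values then
      match stack with
      | [] => false
      | top :: stk => if pvPairsA.get? top ≠ some ch then false else goBalance stk rest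
    else goBalance stack rest

def check_brace_balance_py (content : String) : Bool := goBalance [] content.toList

-- ===== PORT B =====
-- rem2 o c is exactly what Python's s.replace(o + c, '') computes (left-to-right,
-- non-overlapping); it and the lemmas up to stepB_ne_lt exist only to justify reduceB's
-- termination (stepB_ne_lt is cited in reduceB's decreasing_by).

def rem2 (o c : Char) : List Char → List Char
  | [] => []
  | [x] => [x]
  | x :: y :: t => if x = o ∧ y = c then rem2 o c t else x :: rem2 o c (y :: t)

theorem go_nil (old new : List Char) (f : Nat) (acc : List Char) :
    PySem.Chars.replace.go old new f [] acc = acc.reverse := by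
  cases f with
  | zero => rw [PySem.Chars.replace.go.eq_1]; simp
  | succ n => rw [PySem.Chars.replace.go.eq_2 _ _ _ _ (by omega)]

theorem go_eq_rem2 (o c : Char) : ∀ (fuel : Nat) (l acc : List Char), l.length ≤ fuel →
    PySem.Chars.replace.go [o, c] [] fuel l acc = acc.reverse ++ rem2 o c l := by
  intro fuel
  induction fuel with
  | zero =>
    intro l acc h
    have : l = [] := List.eq_nil_of_length_eq_zero (Nat.le_zero.mp h)
    subst this
    rw [PySem.Chars.replace.go.eq_1]; simp [rem2]
  | succ n ih =>
    intro l acc h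
    match l with
    | [] => rw [go_nil]; simp [rem2]
    | [x] =>
      rw [PySem.Chars.replace.go.eq_3]
      have hp : List.isPrefixOf [o, c] [x] = false := by simp [List.isPrefixOf]
      rw [hp]
      simp only [Bool.false_eq_true, if_false]
      rw [go_nil]
      simp [rem2]
    | x :: y :: t =>
      rw [PySem.Chars.replace.go.eq_3]
      by_cases hxy : x = o ∧ y = c
      · obtain ⟨rfl, rfl⟩ := hxy
        have hp : List.isPrefixOf [x, y] (x :: y :: t) = true := by simp [List.isPrefixOf]
        rw [hp]
        simp only [if_true]
        have ht : t.length ≤ n := by simp at h; omega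
        rw [show List.drop [x, y].length (x :: y :: t) = t from rfl]
        rw [ih t _ ht]
        simp [rem2]
      · have hp : List.isPrefixOf [o, c] (x :: y :: t) = false := by
          simp [List.isPrefixOf]
          intro h1 h2; exact hxy ⟨h1.symm, h2.symm⟩
        rw [hp]
        simp only [Bool.false_eq_true, if_false]
        rw [ih (y :: t) (x :: acc) (by simp at h ⊢; omega)]
        simp [rem2, hxy]

theorem replace_pair (o c : Char) (s : List Char) :
    PySem.Chars.replace s [o, c] [] = rem2 o c s := by
  rw [PySem.Chars.replace]
  simp only [List.isEmpty_cons, Bool.false_eq_true, if_false]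
  simpa using go_eq_rem2 o c s.length s [] (le_refl _)

theorem rem2_length_le (o c : Char) (l : List Char) : (rem2 o c l).length ≤ l.length := by
  induction l using rem2.induct o c with
  | case1 => simp [rem2]
  | case2 x => simp [rem2]
  | case3 x y t h ih => simp [rem2, h]; omega
  | case4 x y t h ih => simp [rem2, h] at ih ⊢; omega

theorem rem2_eq_or_lt (o c : Char) (l : List Char) :
    rem2 o c l = l ∨ (rem2 o c l).length < l.length := by
  induction l using rem2.induct o c with
  | case1 => left; rfl
  | case2 x => left; rfl
  | case3 x y t h ih =>
    right
    have := rem2_length_le o c t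
    simp [rem2, h]; omega
  | case4 x y t h ih =>
    rcases ih with heq | hlt
    · left; simp [rem2, h, heq]
    · right; simp [rem2, h]; simpa using hlt

-- one pass of B's while-loop body: the three chained str.replace calls
def stepB (s : List Char) : List Char :=
  PySem.Chars.replace (PySem.Chars.replace (PySem.Chars.replace s ['(', ')'] []) ['[', ']'] []) ['{', '}'] []

theorem stepB_eq (s : List Char) :
    stepB s = rem2 '{' '}' (rem2 '[' ']' (rem2 '(' ')' s)) := by
  simp [stepB, replace_pair]

theorem stepB_ne_lt (s : List Char) (h : stepB s ≠ s) : (stepB s).length < s.length := by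
  rw [stepB_eq] at h ⊢
  rcases rem2_eq_or_lt '(' ')' s with h1 | h1 <;>
  rcases rem2_eq_or_lt '[' ']' (rem2 '(' ')' s) with h2 | h2 <;>
  rcases rem2_eq_or_lt '{' '}' (rem2 '[' ']' (rem2 '(' ')' s)) with h3 | h3 <;>
    first
      | (exact absurd (by rw [h3, h2, h1]) h)
      | (have a := rem2_length_le '(' ')' s
         have b := rem2_length_le '[' ']' (rem2 '(' ')' s)
         have d := rem2_length_le '{' '}' (rem2 '[' ']' (rem2 '(' ')' s))
         omega)

-- B's while-loop: iterate stepB until the string stops changing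
def reduceB (s : List Char) : List Char :=
  let t := stepB s
  if ht : t = s then s else reduceB t
termination_by s.length
decreasing_by exact stepB_ne_lt s ht

def check_brace_balance_py_alt (content : String) : Bool :=
  reduceB (content.toList.filter (fun ch => PySem.Chars.isIn [ch] ("()[]{}".toList))) == []

-- ===== PRECONDITION & SPEC =====
def Spec_check_brace_balance_py (content : String) (out : Bool) : Prop := out = check_brace_balance_py_alt content
instance (content : String) (out : Bool) : Decidable (Spec_check_brace_balance_py content out) := by unfold Spec_check_brace_balance_py; infer_instance

-- ===== CLAIM (what is proved, stated in full; the proofs are below) =====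
def Claim_equal_check_brace_balance_py : Prop := ∀ (content : String), Dom_check_brace_balance_py content → Spec_check_brace_balance_py content (check_brace_balance_py content)

-- ===== LEMMAS AND PROOFS =====

def pvItems : List (Char × Char) := [('(', ')'), ('[', ']'), ('{', '}')]

theorem itemsA : pvPairsA.items = pvItems := by decide

theorem containsA (ch : Char) : pvPairsA.contains ch = (ch == '(' || ch == '[' || ch == '{') := by
  by_cases h1 : ch = '('
  · subst h1; decide
  by_cases h2 : ch = '['
  · subst h2; decide
  by_cases h3 : ch = '{'
  · subst h3; decide
  simp [PySem.Dict.contains, itemsA, pvItems, beq_eq_false_iff_ne.mpr (fun g => h1 g.symm),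
    beq_eq_false_iff_ne.mpr (fun g => h2 g.symm), beq_eq_false_iff_ne.mpr (fun g => h3 g.symm),
    beq_eq_false_iff_ne.mpr h1, beq_eq_false_iff_ne.mpr h2, beq_eq_false_iff_ne.mpr h3]

theorem get?A (ch : Char) : pvPairsA.get? ch =
    (if ch == '(' then some ')' else if ch == '[' then some ']' else if ch == '{' then some '}' else none) := by
  by_cases h1 : ch = '('
  · subst h1; decide
  by_cases h2 : ch = '['
  · subst h2; decide
  by_cases h3 : ch = '{'
  · subst h3; decide
  simp [PySem.Dict.get?, itemsA, pvItems, List.find?, beq_eq_false_iff_ne.mpr (fun g => h1 g.symm),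
    beq_eq_false_iff_ne.mpr (fun g => h2 g.symm), beq_eq_false_iff_ne.mpr (fun g => h3 g.symm),
    beq_eq_false_iff_ne.mpr h1, beq_eq_false_iff_ne.mpr h2, beq_eq_false_iff_ne.mpr h3]

theorem valuesA : pvPairsA.values = [')', ']', '}'] := by decide

theorem goBalance_step_congr (ch : Char) (l₁ l₂ : List Char)
    (h : ∀ st, goBalance st l₁ = goBalance st l₂) (st : List Char) :
    goBalance st (ch :: l₁) = goBalance st (ch :: l₂) := by
  simp only [goBalance]
  split_ifs with hc hv
  · exact h _
  · cases st with
    | nil => rfl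
    | cons top stk =>
      by_cases hm : pvPairsA.get? top ≠ some ch
      · simp [hm]
      · simp [hm, h _]
  · exact h _

theorem goBalance_pair_step (o c : Char) (hoc : (o, c) ∈ pvItems) (t : List Char) (st : List Char) :
    goBalance st (o :: c :: t) = goBalance st t := by
  simp only [pvItems, List.mem_cons, Prod.mk.injEq, List.not_mem_nil, or_false] at hoc
  rcases hoc with ⟨rfl, rfl⟩ | ⟨rfl, rfl⟩ | ⟨rfl, rfl⟩ <;>
    simp [goBalance, containsA, get?A, valuesA]

theorem goBalance_rem2 (o c : Char) (hoc : (o, c) ∈ pvItems) (l : List Char) :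
    ∀ st, goBalance st (rem2 o c l) = goBalance st l := by
  induction l using rem2.induct o c with
  | case1 => intro st; rfl
  | case2 x => intro st; rfl
  | case3 x y t h ih =>
    intro st
    obtain ⟨rfl, rfl⟩ := h
    rw [show rem2 x y (x :: y :: t) = rem2 x y t by simp [rem2]]
    rw [ih st, goBalance_pair_step x y hoc t st]
  | case4 x y t h ih =>
    intro st
    rw [show rem2 o c (x :: y :: t) = x :: rem2 o c (y :: t) by simp [rem2, h]]
    exact goBalance_step_congr x _ _ ih st

theorem isIn_singleton (ch : Char) (l : List Char) :
    PySem.Chars.isIn [ch] l = (ch ∈ l : Bool) := by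
  by_cases h : ch ∈ l
  · have hin : [ch] <:+: l := by
      obtain ⟨a, b, rfl⟩ := List.append_of_mem h
      exact ⟨a, b, by simp⟩
    rw [(PySem.Chars.isIn_iff_infix _ _).mpr hin]
    simp [h]
  · have hin : ¬ [ch] <:+: l := fun hin => h (hin.subset (by simp))
    rw [(PySem.Chars.isIn_eq_false_iff _ _).mpr hin]
    simp [h]

theorem filter_brackets (l : List Char) :
    l.filter (fun ch => PySem.Chars.isIn [ch] ("()[]{}".toList)) =
    l.filter (fun ch => (ch ∈ ("()[]{}".toList) : Bool)) :=
  List.filter_congr (fun x _ => by rw [isIn_singleton])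

theorem goBalance_filter (l : List Char) :
    ∀ st, goBalance st (l.filter (fun ch => PySem.Chars.isIn [ch] ("()[]{}".toList))) = goBalance st l := by
  rw [filter_brackets]
  induction l with
  | nil => intro st; rfl
  | cons ch rest ih =>
    intro st
    by_cases h : ch ∈ ("()[]{}".toList)
    · rw [List.filter_cons, decide_eq_true h]
      simp only [if_true]
      exact goBalance_step_congr ch _ _ ih st
    · rw [List.filter_cons, decide_eq_false h]
      simp only [Bool.false_eq_true, if_false]
      rw [ih st]
      have hb : ¬ (ch = '(' ∨ ch = ')' ∨ ch = '[' ∨ ch = ']' ∨ ch = '{' ∨ ch = '}') := by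
        intro hc
        apply h
        rcases hc with rfl | rfl | rfl | rfl | rfl | rfl <;> decide
      rw [not_or, not_or, not_or, not_or, not_or] at hb
      obtain ⟨n1, n2, n3, n4, n5, n6⟩ := hb
      simp only [goBalance]
      rw [if_neg (by simp [containsA, n1, n3, n5]), if_neg (by simp [valuesA, n2, n4, n6])]

theorem rem2_sublist (o c : Char) (l : List Char) : List.Sublist (rem2 o c l) l := by
  induction l using rem2.induct o c with
  | case1 => simp [rem2]
  | case2 x => simp [rem2]
  | case3 x y t h ih =>
    simp only [rem2, h]
    exact (ih.trans (List.sublist_cons_self c t)).trans (List.sublist_cons_self o (c :: t))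
  | case4 x y t h ih =>
    simp only [rem2, h]
    exact ih.cons₂ x

theorem rem2_lt_of_split (o c : Char) (l : List Char) :
    ∀ (pre suf : List Char), l = pre ++ o :: c :: suf → (rem2 o c l).length < l.length := by
  induction l using rem2.induct o c with
  | case1 => intro pre suf h; simp at h
  | case2 x => intro pre suf h; cases pre <;> simp_all
  | case3 x y t h ih =>
    intro pre suf hsplit
    have := rem2_length_le o c t
    simp [rem2, h]; omega
  | case4 x y t h ih =>
    intro pre suf hsplit
    match pre, hsplit with
    | [], hs => simp at hs; exact absurd ⟨hs.1, hs.2.1⟩ h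
    | p :: pre', hs =>
      simp only [List.cons_append, List.cons.injEq] at hs
      have := ih pre' suf hs.2
      simp only [rem2, h, if_false, List.length_cons]
      simp only [List.length_cons] at this
      simp
      omega

theorem reduceB_fix (s : List Char) : stepB (reduceB s) = reduceB s := by
  induction s using reduceB.induct with
  | case1 s t h => have h' : stepB s = s := h; rw [reduceB, dif_pos h']; exact h'
  | case2 s t h ih => have h' : ¬ stepB s = s := h; rw [reduceB, dif_neg h']; exact ih

theorem reduceB_sublist (s : List Char) : List.Sublist (reduceB s) s := by
  induction s using reduceB.induct with
  | case1 s t h => have h' : stepB s = s := h; rw [reduceB, dif_pos h']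
  | case2 s t h ih =>
    have h' : ¬ stepB s = s := h
    rw [reduceB, dif_neg h']
    refine ih.trans ?_
    show List.Sublist (stepB s) s
    rw [stepB_eq]
    exact ((rem2_sublist _ _ _).trans (rem2_sublist _ _ _)).trans (rem2_sublist _ _ _)

theorem fix_all (t : List Char) (h : stepB t = t) :
    rem2 '(' ')' t = t ∧ rem2 '[' ']' t = t ∧ rem2 '{' '}' t = t := by
  rw [stepB_eq] at h
  have a := rem2_length_le '(' ')' t
  have b := rem2_length_le '[' ']' (rem2 '(' ')' t)
  have d := rem2_length_le '{' '}' (rem2 '[' ']' (rem2 '(' ')' t))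
  have hl : t.length = (rem2 '{' '}' (rem2 '[' ']' (rem2 '(' ')' t))).length := by rw [h]
  have e1 : rem2 '(' ')' t = t := by
    rcases rem2_eq_or_lt '(' ')' t with h1 | h1
    · exact h1
    · omega
  rw [e1] at h b d hl ⊢
  have e2 : rem2 '[' ']' t = t := by
    rcases rem2_eq_or_lt '[' ']' t with h2 | h2
    · exact h2
    · omega
  rw [e2] at h d hl ⊢
  exact ⟨rfl, rfl, h⟩

theorem goBalance_stepB (s : List Char) : goBalance [] (stepB s) = goBalance [] s := by
  rw [stepB_eq]
  rw [goBalance_rem2 '{' '}' (by decide) _ [], goBalance_rem2 '[' ']' (by decide) _ [],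
    goBalance_rem2 '(' ')' (by decide) _ []]

theorem goBalance_reduceB (s : List Char) : goBalance [] (reduceB s) = goBalance [] s := by
  induction s using reduceB.induct with
  | case1 s t h => have h' : stepB s = s := h; rw [reduceB, dif_pos h']
  | case2 s t h ih =>
    have h' : ¬ stepB s = s := h
    rw [reduceB, dif_neg h', ih, goBalance_stepB]

def pvOpen (k : Char) : Bool := decide (k = '(' ∨ k = '[' ∨ k = '{')

theorem pv_dropWhile_head_false (p : Char → Bool) : ∀ (t : List Char) (c : Char) (l : List Char),
    List.dropWhile p t = c :: l → p c = false := by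
  intro t
  induction t with
  | nil => intro c l h; simp [List.dropWhile] at h
  | cons x xs ih =>
    intro c l h
    rw [List.dropWhile_cons] at h
    by_cases hp : p x = true
    · rw [if_pos hp] at h; exact ih c l h
    · rw [if_neg hp] at h
      cases h
      simpa using hp

theorem goBalance_openers (u : List Char) (h : ∀ ch ∈ u, ch = '(' ∨ ch = '[' ∨ ch = '{') :
    ∀ st v, goBalance st (u ++ v) = goBalance (u.reverse ++ st) v := by
  induction u with
  | nil => intro st v; simp
  | cons ch u' ih =>
    intro st v
    have hch := h ch (by simp)
    have hc : pvPairsA.contains ch = true := by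
      rw [containsA]
      rcases hch with rfl | rfl | rfl <;> decide
    rw [List.cons_append]
    simp only [goBalance]
    rw [if_pos hc, ih (fun c hc' => h c (by simp [hc'])) (ch :: st) v]
    simp

theorem terminal (t : List Char) (hb : ∀ ch ∈ t, ch ∈ ("()[]{}".toList))
    (h1 : rem2 '(' ')' t = t) (h2 : rem2 '[' ']' t = t) (h3 : rem2 '{' '}' t = t)
    (hne : t ≠ []) : goBalance [] t = false := by
  have hsplit := List.takeWhile_append_dropWhile (p := pvOpen) (l := t)
  have hu : ∀ ch ∈ t.takeWhile pvOpen, ch = '(' ∨ ch = '[' ∨ ch = '{' := by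
    intro ch hch
    have hp : pvOpen ch = true := List.mem_takeWhile_imp hch
    exact of_decide_eq_true hp
  conv_lhs => rw [← hsplit]
  rw [goBalance_openers _ hu]
  cases hr : t.dropWhile pvOpen with
  | nil =>
    rw [hr, List.append_nil] at hsplit
    simp only [goBalance]
    rw [hsplit, List.append_nil]
    simpa using hne
  | cons c r' =>
    have hcnot : ¬ (c = '(' ∨ c = '[' ∨ c = '{') := by
      have := pv_dropWhile_head_false pvOpen t c r' hr
      simpa [pvOpen] using this
    have hcm : c ∈ t := (List.dropWhile_suffix pvOpen).subset (by rw [hr]; simp)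
    have hc6 := hb c hcm
    have hclose : c = ')' ∨ c = ']' ∨ c = '}' := by
      simp only [show ("()[]{}".toList) = ['(', ')', '[', ']', '{', '}'] from rfl,
        List.mem_cons, List.not_mem_nil, or_false] at hc6
      tauto
    have hccon : pvPairsA.contains c = false := by
      rw [containsA]
      rcases hclose with rfl | rfl | rfl <;> decide
    have hcval : c ∈ pvPairsA.values := by
      rw [valuesA]
      rcases hclose with rfl | rfl | rfl <;> decide
    simp only [goBalance]
    rw [if_neg (by simp [hccon]), if_pos hcval]
    rw [List.append_nil]
    cases hur : (t.takeWhile pvOpen).reverse with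
    | nil => rfl
    | cons o w =>
      have ho : o = '(' ∨ o = '[' ∨ o = '{' := by
        apply hu
        rw [← List.mem_reverse, hur]
        simp
      show (if pvPairsA.get? o ≠ some c then false else goBalance w r') = false
      by_cases hm : pvPairsA.get? o = some c
      · exfalso
        have hueq : t.takeWhile pvOpen = w.reverse ++ [o] := by
          rw [← List.reverse_reverse (t.takeWhile pvOpen), hur]
          simp
        have hteq : t = w.reverse ++ o :: c :: r' := by
          conv_lhs => rw [← hsplit]
          rw [hueq, hr]
          simp
        have hpair : rem2 o c t = t := by
          rcases ho with rfl | rfl | rfl <;>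
            rw [get?A] at hm <;> simp at hm <;> subst hm <;> assumption
        have := rem2_lt_of_split o c t w.reverse r' hteq
        rw [hpair] at this
        omega
      · rw [if_pos hm]

-- ===== VERDICT (by name: the statement is the Claim_ definition above) =====
theorem check_brace_balance_py_spec : Claim_equal_check_brace_balance_py := by
  intro content _
  unfold Spec_check_brace_balance_py check_brace_balance_py check_brace_balance_py_alt
  rw [← goBalance_filter content.toList []]
  rw [← goBalance_reduceB (content.toList.filter (fun ch => PySem.Chars.isIn [ch] ("()[]{}".toList)))]
  by_cases hR : reduceB (content.toList.filter (fun ch => PySem.Chars.isIn [ch] ("()[]{}".toList))) = []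
  · rw [hR]
    rfl
  · have hfix := fix_all _ (reduceB_fix (content.toList.filter (fun ch => PySem.Chars.isIn [ch] ("()[]{}".toList))))
    have hbr : ∀ ch ∈ reduceB (content.toList.filter (fun ch => PySem.Chars.isIn [ch] ("()[]{}".toList))),
        ch ∈ ("()[]{}".toList) := by
      intro ch hch
      have hmem := (reduceB_sublist _).subset hch
      rw [filter_brackets] at hmem
      have hp := List.of_mem_filter (p := fun k => (k ∈ ("()[]{}".toList) : Bool)) hmem
      exact of_decide_eq_true hp
    rw [terminal _ hbr hfix.1 hfix.2.1 hfix.2.2 hR]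
    exact (beq_eq_false_iff_ne.mpr hR).symm
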